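-- pv_equiv track=rewrite | github.com/sandykrch/Search-the-longest-compouded-word | Search_LCW/app.py | find_compound_words
-- ===== SOURCE A (Python) =====
-- def can_form_word(word, words_set, memo):
--     if word in memo:
--         return memo[word]  # Return cached result if available
--
--     # Check each possible prefix-suffix split
--     for i in range(1, len(word)):
--         prefix = word[:i]
--         suffix = word[i:]
--         if prefix in words_set and (suffix in words_set or can_form_word(suffix, words_set, memo)):
--             memo[word] = True  # Cache the result
--             return True
--
--     memo[word] = False  # Cache the result
--     return False
--
-- def find_compound_words(words):
--     words_set = set(words)
--     compound_words = []
--     memo = {}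
--
--     # Check each word in the list
--     for word in words:
--         if can_form_word(word, words_set, memo):
--             compound_words.append(word)
--
--     # Sort the compound words by length in descending order
--     compound_words.sort(key=len, reverse=True)
--     longest_word = compound_words[0] if compound_words else None
--     second_longest_word = compound_words[1] if len(compound_words) > 1 else None
--
--     return longest_word, second_longest_word
-- ===== SOURCE B (Python) =====
-- def find_compound_words(words):
--     ws = set(words)
--     best = None
--     second = None
--     for w in words:
--         n = len(w)
--         # dp[j]: suffix w[j:] is a concatenation of >= 1 words from ws
--         dp = [False] * (n + 1)
--         dp[n] = True
--         for j in range(n - 1, 0, -1):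
--             dp[j] = any(w[j:k] in ws and dp[k] for k in range(j + 1, n + 1))
--         if any(w[:i] in ws and dp[i] for i in range(1, n)):
--             if best is None or n > len(best):
--                 second = best
--                 best = w
--             elif second is None or n > len(second):
--                 second = w
--     return best, second
-- ===== Notes on version B (the rewrite author's own statement) =====
-- stated objective: alternative
-- what changed: Replaces A's memoized top-down recursion (can_form_word) with a per-word bottom-up word-break DP table, and replaces A's sort-by-length-then-take-two with a single order-stable top-2 scan.
import Mathlib
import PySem

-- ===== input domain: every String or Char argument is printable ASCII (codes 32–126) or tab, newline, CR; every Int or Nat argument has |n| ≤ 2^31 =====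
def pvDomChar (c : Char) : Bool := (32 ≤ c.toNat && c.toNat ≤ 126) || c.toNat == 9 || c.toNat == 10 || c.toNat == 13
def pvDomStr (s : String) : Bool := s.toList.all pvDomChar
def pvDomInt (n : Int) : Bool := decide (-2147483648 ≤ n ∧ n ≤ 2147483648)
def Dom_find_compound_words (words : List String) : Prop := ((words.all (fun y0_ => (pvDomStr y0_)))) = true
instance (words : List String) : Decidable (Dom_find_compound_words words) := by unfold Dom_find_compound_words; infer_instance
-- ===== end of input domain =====

-- B replaces A's memoized top-down recursion by a per-word bottom-up word-break DP table and
-- replaces A's sort-then-pick-two by a single stable top-2 scan (objective: alternative).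
-- Both ports work on `String.toList` (string slicing/equality is exact on the char-list side).

-- ===== PORT A =====
-- A's `for i in range(1, len(word))` loop with early return: `cfw_loop word ws memo j`
-- is the loop from Python's i = j + 1 upward (reindexed so termination is structural in the index).
mutual
def can_form_word (word : List Char) (ws : PySem.Set (List Char))
    (memo : PySem.Dict (List Char) Bool) : Bool × PySem.Dict (List Char) Bool :=
  match memo.get? word with
  | some b => (b, memo)                     -- return cached result
  | none => cfw_loop word ws memo 0
  termination_by (word.length, word.length + 1)
  decreasing_by exact Prod.Lex.right _ (by omega)

def cfw_loop (word : List Char) (ws : PySem.Set (List Char))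
    (memo : PySem.Dict (List Char) Bool) (j : Nat) : Bool × PySem.Dict (List Char) Bool :=
  if hj : j + 1 < word.length then
    let pre := PySem.List.slice word none (some ((j : Int) + 1))        -- word[:i]
    let suf := PySem.List.slice word (some ((j : Int) + 1)) none        -- word[i:]
    if pre ∈ ws then
      if suf ∈ ws then (true, memo.insert word true)
      else
        match can_form_word suf ws memo with
        | (true, m') => (true, m'.insert word true)
        | (false, m') => cfw_loop word ws m' (j + 1)
    else cfw_loop word ws memo (j + 1)
  else (false, memo.insert word false)
  termination_by (word.length, word.length - j)
  decreasing_by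
  · exact Prod.Lex.left _ _ (by
      show (PySem.List.slice word (some ((j : Int) + 1)) none).length < word.length
      have h1 : ((j : Int) + 1) = ((j + 1 : Nat) : Int) := by push_cast; ring
      rw [h1, PySem.List.slice_from_natCast]
      simp; omega)
  · exact Prod.Lex.right _ (by omega)
  · exact Prod.Lex.right _ (by omega)
end

def find_compound_words (words : List String) : Option String × Option String :=
  let ws : PySem.Set (List Char) := PySem.Set.ofList (words.map String.toList)
  let st := words.foldl
    (fun (st : List String × PySem.Dict (List Char) Bool) w =>
      let r := can_form_word w.toList ws st.2
      (if r.1 then st.1 ++ [w] else st.1, r.2))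
    ([], PySem.Dict.empty)
  let cs := PySem.List.sorted st.1 (fun s => s.toList.length) true     -- sort(key=len, reverse=True)
  (cs.head?, cs[1]?)

-- ===== PORT B =====
-- dp[j] (1 ≤ j ≤ n): the suffix w[j:] is a concatenation of ≥ 1 words of ws; built right-to-left.
def alt_dp (w : List Char) (ws : PySem.Set (List Char)) : List Bool :=
  let n := w.length
  let dp0 := (List.replicate (n + 1) false).set n true
  (PySem.List.pyRange ((n : Int) - 1) 0 (-1)).foldl
    (fun dp j =>
      dp.set j.toNat
        ((PySem.List.pyRange (j + 1) ((n : Int) + 1) 1).any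
          (fun k => decide (PySem.List.slice w (some j) (some k) ∈ ws) && dp.getD k.toNat false)))
    dp0

def alt_compound (w : List Char) (ws : PySem.Set (List Char)) : Bool :=
  let n := w.length
  let dp := alt_dp w ws
  (PySem.List.pyRange 1 (n : Int) 1).any
    (fun i => decide (PySem.List.slice w none (some i) ∈ ws) && dp.getD i.toNat false)

def alt_step (ws : PySem.Set (List Char)) (p : Option String × Option String) (w : String) :
    Option String × Option String :=
  if alt_compound w.toList ws then
    match p.1 with
    | none => (some w, p.1)                       -- best is None: second, best = best, w
    | some b =>
      if b.toList.length < w.toList.length then (some w, p.1)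
      else
        match p.2 with
        | none => (p.1, some w)                   -- second is None
        | some s => if s.toList.length < w.toList.length then (p.1, some w) else p
  else p

def find_compound_words_alt (words : List String) : Option String × Option String :=
  let ws : PySem.Set (List Char) := PySem.Set.ofList (words.map String.toList)
  words.foldl (alt_step ws) (none, none)

-- ===== PRECONDITION & SPEC =====
def Spec_find_compound_words (words : List String) (out : Option String × Option String) : Prop := out = find_compound_words_alt words
instance (words : List String) (out : Option String × Option String) : Decidable (Spec_find_compound_words words out) := by unfold Spec_find_compound_words; infer_instance

-- ===== CLAIM (what is proved, stated in full; the proofs are below) =====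
def Claim_equal_find_compound_words : Prop := ∀ (words : List String), Dom_find_compound_words words → Spec_find_compound_words words (find_compound_words words)

-- ===== LEMMAS AND PROOFS =====

-- `Breakable S w` (defined through the fuel parameter of BreakF): w is a concatenation of ≥ 1 members of S.
def BreakF (S : PySem.Set (List Char)) : Nat → List Char → Prop
  | 0, w => w ∈ S
  | f + 1, w => w ∈ S ∨ ∃ i, 0 < i ∧ i < w.length ∧ w.take i ∈ S ∧ BreakF S f (w.drop i)

def Breakable (S : PySem.Set (List Char)) (w : List Char) : Prop := BreakF S w.length w

-- `Split2 S w`: w is a concatenation of ≥ 2 members of S (what both compound tests decide).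
def Split2 (S : PySem.Set (List Char)) (w : List Char) : Prop :=
  ∃ i, 0 < i ∧ i < w.length ∧ w.take i ∈ S ∧ Breakable S (w.drop i)

theorem slice_to_succ (w : List Char) (j : Nat) :
    PySem.List.slice w none (some ((j : Int) + 1)) = w.take (j + 1) := by
  have h1 : ((j : Int) + 1) = ((j + 1 : Nat) : Int) := by push_cast; ring
  rw [h1, PySem.List.slice_to_natCast]

theorem slice_from_succ (w : List Char) (j : Nat) :
    PySem.List.slice w (some ((j : Int) + 1)) none = w.drop (j + 1) := by
  have h1 : ((j : Int) + 1) = ((j + 1 : Nat) : Int) := by push_cast; ring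
  rw [h1, PySem.List.slice_from_natCast]

def MemoOK (S : PySem.Set (List Char)) (m : PySem.Dict (List Char) Bool) : Prop :=
  ∀ k b, m.get? k = some b → (b = true ↔ Split2 S k)

theorem breakF_succ (S : PySem.Set (List Char)) :
    ∀ (f : Nat) (w : List Char), w.length ≤ f → (BreakF S (f + 1) w ↔ BreakF S f w) := by
  intro f
  induction f with
  | zero =>
    intro w hw
    have hnil : w = [] := List.eq_nil_of_length_eq_zero (by omega)
    subst hnil
    simp [BreakF]
  | succ f ih =>
    intro w hw
    show (w ∈ S ∨ ∃ i, 0 < i ∧ i < w.length ∧ w.take i ∈ S ∧ BreakF S (f + 1) (w.drop i)) ↔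
         (w ∈ S ∨ ∃ i, 0 < i ∧ i < w.length ∧ w.take i ∈ S ∧ BreakF S f (w.drop i))
    constructor <;> rintro (h | ⟨i, hi0, hilen, hmem, hb⟩)
    · exact Or.inl h
    · exact Or.inr ⟨i, hi0, hilen, hmem, by
        rw [← ih (w.drop i) (by simp; omega)]; exact hb⟩
    · exact Or.inl h
    · exact Or.inr ⟨i, hi0, hilen, hmem, by
        rw [ih (w.drop i) (by simp; omega)]; exact hb⟩

theorem breakF_of_le (S : PySem.Set (List Char)) (w : List Char) :
    ∀ (f : Nat), w.length ≤ f → (BreakF S f w ↔ Breakable S w) := by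
  intro f
  induction f with
  | zero =>
    intro hw
    have hnil : w = [] := List.eq_nil_of_length_eq_zero (by omega)
    subst hnil; rfl
  | succ f ih =>
    intro hw
    rcases Nat.lt_or_ge w.length (f + 1) with h | h
    · rw [breakF_succ S f w (by omega)]; exact ih (by omega)
    · have : w.length = f + 1 := by omega
      rw [Breakable, this]

theorem breakable_iff (S : PySem.Set (List Char)) (w : List Char) :
    Breakable S w ↔ w ∈ S ∨ Split2 S w := by
  rcases Nat.eq_zero_or_pos w.length with h | h
  · have hnil : w = [] := List.eq_nil_of_length_eq_zero h
    subst hnil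
    constructor
    · intro hb; exact Or.inl hb
    · rintro (hb | ⟨i, hi0, hilen, _⟩)
      · exact hb
      · simp at hilen
  · obtain ⟨f, hf⟩ : ∃ f, w.length = f + 1 := ⟨w.length - 1, by omega⟩
    rw [Breakable, hf]
    show (w ∈ S ∨ ∃ i, 0 < i ∧ i < w.length ∧ w.take i ∈ S ∧ BreakF S f (w.drop i)) ↔ _
    unfold Split2
    constructor <;> rintro (hm | ⟨i, hi0, hilen, hmem, hb⟩)
    · exact Or.inl hm
    · exact Or.inr ⟨i, hi0, hilen, hmem, by
        rw [← breakF_of_le S (w.drop i) f (by simp; omega)]; exact hb⟩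
    · exact Or.inl hm
    · exact Or.inr ⟨i, hi0, hilen, hmem, by
        rw [breakF_of_le S (w.drop i) f (by simp; omega)]; exact hb⟩

mutual
theorem can_form_word_spec (word : List Char) (S : PySem.Set (List Char))
    (m : PySem.Dict (List Char) Bool) (hm : MemoOK S m) :
    MemoOK S (can_form_word word S m).2 ∧
      ((can_form_word word S m).1 = true ↔ Split2 S word) := by
  rw [can_form_word]
  cases hget : m.get? word with
  | some b => exact ⟨hm, hm word b hget⟩
  | none =>
    exact cfw_loop_spec word S m 0 hm (by intro i hi0 hi1 _; omega)
  termination_by (word.length, word.length + 1)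
  decreasing_by exact Prod.Lex.right _ (by omega)

theorem cfw_loop_spec (word : List Char) (S : PySem.Set (List Char))
    (m : PySem.Dict (List Char) Bool) (j : Nat) (hm : MemoOK S m)
    (hprev : ∀ i, 0 < i → i ≤ j → ¬(word.take i ∈ S ∧ Breakable S (word.drop i))) :
    MemoOK S (cfw_loop word S m j).2 ∧
      ((cfw_loop word S m j).1 = true ↔ Split2 S word) := by
  rw [cfw_loop]
  by_cases hj : j + 1 < word.length
  · rw [dif_pos hj]
    simp only [slice_to_succ, slice_from_succ]
    by_cases hpre : word.take (j + 1) ∈ S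
    · rw [if_pos hpre]
      by_cases hsuf : word.drop (j + 1) ∈ S
      · rw [if_pos hsuf]
        have hsplit : Split2 S word :=
          ⟨j + 1, by omega, hj, hpre, (breakable_iff S _).2 (Or.inl hsuf)⟩
        refine ⟨?_, by simp [hsplit]⟩
        intro k b hk
        rw [PySem.Dict.get?_insert] at hk
        by_cases hkw : k = word
        · rw [if_pos hkw] at hk; cases hk; simp [hkw, hsplit]
        · rw [if_neg hkw] at hk; exact hm k b hk
      · rw [if_neg hsuf]
        rcases hcfw : can_form_word (word.drop (j + 1)) S m with ⟨b, m'⟩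
        have hrec := can_form_word_spec (word.drop (j + 1)) S m hm
        rw [hcfw] at hrec
        obtain ⟨hm', hb⟩ := hrec
        simp only at hm' hb
        cases b with
        | true =>
          simp only
          have hsplit : Split2 S word :=
            ⟨j + 1, by omega, hj, hpre,
              (breakable_iff S _).2 (Or.inr (hb.1 rfl))⟩
          refine ⟨?_, by simp [hsplit]⟩
          intro k b' hk
          rw [PySem.Dict.get?_insert] at hk
          by_cases hkw : k = word
          · rw [if_pos hkw] at hk; cases hk; simp [hkw, hsplit]
          · rw [if_neg hkw] at hk; exact hm' k b' hk
        | false =>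
          simp only
          refine cfw_loop_spec word S m' (j + 1) hm' ?_
          intro i hi0 hi1 ⟨hti, hbi⟩
          rcases Nat.lt_or_ge i (j + 1) with h | h
          · exact hprev i hi0 (by omega) ⟨hti, hbi⟩
          · have hij : i = j + 1 := by omega
            subst hij
            rcases (breakable_iff S _).1 hbi with h' | h'
            · exact hsuf h'
            · simp at hb; exact hb h'
    · rw [if_neg hpre]
      refine cfw_loop_spec word S m (j + 1) hm ?_
      intro i hi0 hi1 ⟨hti, hbi⟩
      rcases Nat.lt_or_ge i (j + 1) with h | h
      · exact hprev i hi0 (by omega) ⟨hti, hbi⟩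
      · have hij : i = j + 1 := by omega
        subst hij; exact hpre hti
  · rw [dif_neg hj]
    have hnsplit : ¬ Split2 S word := by
      rintro ⟨i, hi0, hilen, hti, hbi⟩
      exact hprev i hi0 (by omega) ⟨hti, hbi⟩
    refine ⟨?_, by simp [hnsplit]⟩
    intro k b hk
    rw [PySem.Dict.get?_insert] at hk
    by_cases hkw : k = word
    · rw [if_pos hkw] at hk; cases hk; simp [hkw, hnsplit]
    · rw [if_neg hkw] at hk; exact hm k b hk
  termination_by (word.length, word.length - j)
  decreasing_by
  · exact Prod.Lex.left _ _ (by simp; omega)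
  · exact Prod.Lex.right _ (by omega)
  · exact Prod.Lex.right _ (by omega)
end

theorem getD_set_bool (l : List Bool) (m : Nat) (v : Bool) (k : Nat) (hk : k < l.length) :
    (l.set m v).getD k false = if m = k then v else l.getD k false := by
  rw [List.getD_eq_getElem _ _ (by simpa using hk), List.getElem_set]
  split <;> [rfl; rw [List.getD_eq_getElem _ _ hk]]

-- the freshly computed dp entry at index a+1 decides Breakable of the suffix behind it
theorem dp_entry (w : List Char) (S : PySem.Set (List Char)) (a : Nat) (dp : List Bool)
    (ha1 : a + 1 < w.length) (hlen : dp.length = w.length + 1)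
    (hn : dp.getD w.length false = true)
    (hinv : ∀ j, a + 1 < j → j < w.length →
      (dp.getD j false = true ↔ Breakable S (w.drop j))) :
    ((PySem.List.pyRange (((a + 1 : Nat) : Int) + 1) ((w.length : Int) + 1) 1).any
        (fun k => decide (PySem.List.slice w (some ((a + 1 : Nat) : Int)) (some k) ∈ S)
          && dp.getD k.toNat false)) = true
      ↔ Breakable S (w.drop (a + 1)) := by
  rw [List.any_eq_true, breakable_iff]
  constructor
  · rintro ⟨k, hk, hcond⟩
    rw [PySem.List.mem_pyRange_one] at hk
    obtain ⟨hk1, hk2⟩ := hk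
    have hk0 : k = ((k.toNat : Nat) : Int) := by omega
    set κ := k.toNat with hκ
    have hκ1 : a + 2 ≤ κ := by omega
    have hκ2 : κ ≤ w.length := by omega
    simp only [Bool.and_eq_true, decide_eq_true_eq] at hcond
    obtain ⟨hsl, hdp⟩ := hcond
    rw [hk0, PySem.List.slice_natCast] at hsl
    rcases Nat.lt_or_ge κ w.length with hlt | hge
    · refine Or.inr ⟨κ - (a + 1), by omega, by simp; omega, hsl, ?_⟩
      rw [List.drop_drop, show (a + 1) + (κ - (a + 1)) = κ by omega]
      exact (hinv κ (by omega) hlt).1 hdp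
    · have hκn : κ = w.length := by omega
      rw [hκn, List.take_of_length_le (by simp)] at hsl
      exact Or.inl hsl
  · rintro (hm | ⟨i, hi0, hilen, hti, hbi⟩)
    · refine ⟨((w.length : Nat) : Int), ?_, ?_⟩
      · rw [PySem.List.mem_pyRange_one]; constructor <;> [omega; omega]
      · simp only [Bool.and_eq_true, decide_eq_true_eq, Int.toNat_natCast]
        rw [PySem.List.slice_natCast, List.take_of_length_le (by simp)]
        exact ⟨hm, hn⟩
    · simp only [List.length_drop] at hilen
      refine ⟨((a + 1 + i : Nat) : Int), ?_, ?_⟩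
      · rw [PySem.List.mem_pyRange_one]; constructor <;> [omega; omega]
      · simp only [Bool.and_eq_true, decide_eq_true_eq, Int.toNat_natCast]
        rw [PySem.List.slice_natCast, show (a + 1 + i) - (a + 1) = i by omega]
        refine ⟨hti, (hinv (a + 1 + i) (by omega) (by omega)).2 ?_⟩
        rw [← List.drop_drop]
        exact hbi
  
theorem dp_loop_inv (w : List Char) (S : PySem.Set (List Char)) :
    ∀ (a : Nat) (dp : List Bool), a < w.length →
      dp.length = w.length + 1 →
      dp.getD w.length false = true →
      (∀ j, a < j → j < w.length → (dp.getD j false = true ↔ Breakable S (w.drop j))) →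
      ∀ j, 0 < j → j < w.length →
        (((PySem.List.pyRange ((a : Nat) : Int) 0 (-1)).foldl
            (fun dp j =>
              dp.set j.toNat
                ((PySem.List.pyRange (j + 1) ((w.length : Int) + 1) 1).any
                  (fun k => decide (PySem.List.slice w (some j) (some k) ∈ S)
                    && dp.getD k.toNat false)))
            dp).getD j false = true ↔ Breakable S (w.drop j)) := by
  intro a
  induction a with
  | zero =>
    intro dp _ _ _ hinv j hj0 hjn
    rw [PySem.List.pyRange_neg_one_eq_nil (by omega)]
    exact hinv j hj0 hjn
  | succ a ih =>
    intro dp ha hlen hn hinv j hj0 hjn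
    rw [PySem.List.pyRange_neg_one_cons (by exact_mod_cast Nat.succ_pos a),
        show ((a + 1 : Nat) : Int) - 1 = ((a : Nat) : Int) by push_cast; ring,
        List.foldl_cons]
    have hset : ((dp.set ((((a + 1 : Nat) : Int)).toNat)
        ((PySem.List.pyRange (((a + 1 : Nat) : Int) + 1) ((w.length : Int) + 1) 1).any
          (fun k => decide (PySem.List.slice w (some ((a + 1 : Nat) : Int)) (some k) ∈ S)
            && dp.getD k.toNat false)))) = dp.set (a + 1)
        ((PySem.List.pyRange (((a + 1 : Nat) : Int) + 1) ((w.length : Int) + 1) 1).any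
          (fun k => decide (PySem.List.slice w (some ((a + 1 : Nat) : Int)) (some k) ∈ S)
            && dp.getD k.toNat false)) := by rw [Int.toNat_natCast]
    rw [hset]
    refine ih _ (by omega) (by simpa using hlen) ?_ ?_ j hj0 hjn
    · rw [getD_set_bool _ _ _ _ (by omega), if_neg (by omega)]
      exact hn
    · intro j' hj'0 hj'n
      rw [getD_set_bool _ _ _ _ (by omega)]
      by_cases hje : a + 1 = j'
      · rw [if_pos hje]
        subst hje
        exact dp_entry w S a dp hj'n hlen hn hinv
      · rw [if_neg hje]
        exact hinv j' (by omega) hj'n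

-- B's dp table entries decide Breakable on suffixes.
theorem alt_dp_spec (w : List Char) (S : PySem.Set (List Char)) :
    ∀ j, 0 < j → j < w.length →
      ((alt_dp w S).getD j false = true ↔ Breakable S (w.drop j)) := by
  intro j hj0 hjn
  have hw : 0 < w.length := by omega
  unfold alt_dp
  simp only
  rw [show ((w.length : Int) - 1) = ((w.length - 1 : Nat) : Int) by omega]
  refine dp_loop_inv w S (w.length - 1) _ (by omega) (by simp) ?_ ?_ j hj0 hjn
  · rw [getD_set_bool _ _ _ _ (by simp), if_pos rfl]
  · intro j' hj'0 hj'n; omega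

theorem alt_compound_iff (w : List Char) (S : PySem.Set (List Char)) :
    alt_compound w S = true ↔ Split2 S w := by
  unfold alt_compound
  simp only
  rw [List.any_eq_true]
  unfold Split2
  constructor
  · rintro ⟨i, hi, hcond⟩
    rw [PySem.List.mem_pyRange_one] at hi
    have hi0 : i = ((i.toNat : Nat) : Int) := by omega
    simp only [Bool.and_eq_true, decide_eq_true_eq] at hcond
    obtain ⟨hsl, hdp⟩ := hcond
    rw [hi0, PySem.List.slice_to_natCast] at hsl
    refine ⟨i.toNat, by omega, by omega, hsl, ?_⟩
    exact (alt_dp_spec w S i.toNat (by omega) (by omega)).1 hdp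
  · rintro ⟨i, hi0, hin, hti, hbi⟩
    refine ⟨((i : Nat) : Int), ?_, ?_⟩
    · rw [PySem.List.mem_pyRange_one]; constructor <;> [omega; omega]
    · simp only [Bool.and_eq_true, decide_eq_true_eq, Int.toNat_natCast]
      rw [PySem.List.slice_to_natCast]
      exact ⟨hti, (alt_dp_spec w S i hi0 hin).2 hbi⟩

-- A's collection loop produces exactly the words B's test accepts, in order.
theorem foldA_filter (S : PySem.Set (List Char)) (l : List String) :
    ∀ (acc : List String) (m : PySem.Dict (List Char) Bool), MemoOK S m →
      (l.foldl
        (fun (st : List String × PySem.Dict (List Char) Bool) w =>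
          let r := can_form_word w.toList S st.2
          (if r.1 then st.1 ++ [w] else st.1, r.2))
        (acc, m)).1 = acc ++ l.filter (fun w => alt_compound w.toList S) := by
  induction l with
  | nil => intro acc m _; simp
  | cons w l ih =>
    intro acc m hm
    rw [List.foldl_cons]
    simp only
    rcases hcfw : can_form_word w.toList S m with ⟨b, m'⟩
    have hrec := can_form_word_spec w.toList S m hm
    rw [hcfw] at hrec
    obtain ⟨hm', hb⟩ := hrec
    simp only at hm' hb
    have hbc : b = alt_compound w.toList S := by
      have h2 := alt_compound_iff w.toList S
      cases b <;> cases h3 : alt_compound w.toList S <;> simp_all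
    simp only
    cases b with
    | true =>
      rw [if_pos rfl, ih (acc ++ [w]) m' hm',
          List.filter_cons_of_pos (by rw [← hbc]), List.append_assoc, List.singleton_append]
    | false =>
      rw [if_neg (by simp), ih acc m' hm',
          List.filter_cons_of_neg (by rw [← hbc]; simp)]

-- One step of B's top-2 scan tracks the first two entries of the stable descending insertion.
def top2step (p : Option String × Option String) (w : String) : Option String × Option String :=
  match p.1 with
  | none => (some w, p.1)
  | some b =>
    if b.toList.length < w.toList.length then (some w, p.1)
    else
      match p.2 with
      | none => (p.1, some w)
      | some s => if s.toList.length < w.toList.length then (p.1, some w) else p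

theorem top2_step (x : String) (s : List String) :
    top2step (s.head?, s[1]?) x
      = ((PySem.List.insertBy
            (fun a b => decide (b.toList.length < a.toList.length)) x s).head?,
         (PySem.List.insertBy
            (fun a b => decide (b.toList.length < a.toList.length)) x s)[1]?) := by
  cases s with
  | nil => simp [top2step, PySem.List.insertBy]
  | cons a t =>
    by_cases h1 : a.length < x.length
    · simp [top2step, PySem.List.insertBy, h1]
    · cases t with
      | nil => simp [top2step, PySem.List.insertBy, h1]
      | cons b t' =>
        by_cases h2 : b.length < x.length
        · simp [top2step, PySem.List.insertBy, h1, h2]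
        · simp [top2step, PySem.List.insertBy, h1, h2]

theorem top2_fold (l : List String) :
    l.foldl top2step (none, none)
      = ((PySem.List.sorted l (fun s => s.toList.length) true).head?,
         (PySem.List.sorted l (fun s => s.toList.length) true)[1]?) := by
  rw [PySem.List.sorted_rev_eq_foldl_insertBy]
  have aux : ∀ (l : List String) (s : List String),
      l.foldl top2step (s.head?, s[1]?)
        = ((l.foldl (fun acc x => PySem.List.insertBy
              (fun a b => decide (b.toList.length < a.toList.length)) x acc) s).head?,
           (l.foldl (fun acc x => PySem.List.insertBy
              (fun a b => decide (b.toList.length < a.toList.length)) x acc) s)[1]?) := by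
    intro l
    induction l with
    | nil => intro s; rfl
    | cons x l ih =>
      intro s
      rw [List.foldl_cons, top2_step x s, List.foldl_cons]
      exact ih _
  have h0 : ((none, none) : Option String × Option String)
      = (([] : List String).head?, ([] : List String)[1]?) := rfl
  rw [h0, aux]

-- ===== VERDICT (by name: the statement is the Claim_ definition above) =====
theorem find_compound_words_spec : Claim_equal_find_compound_words := by
  intro words _
  unfold Spec_find_compound_words find_compound_words find_compound_words_alt
  simp only
  have hA := foldA_filter (PySem.Set.ofList (words.map String.toList)) words []
    PySem.Dict.empty (by intro k b hk; rw [PySem.Dict.get?_empty] at hk; cases hk)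
  rw [hA, List.nil_append]
  have hB : words.foldl (alt_step (PySem.Set.ofList (words.map String.toList))) (none, none)
      = (words.filter
          (fun w => alt_compound w.toList (PySem.Set.ofList (words.map String.toList)))).foldl
            top2step (none, none) := by
    rw [← PySem.List.foldl_if_eq_foldl_filter
      (fun w => alt_compound w.toList (PySem.Set.ofList (words.map String.toList)))
      top2step words (none, none)]
    rfl
  rw [hB, top2_fold]
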